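-- pv_equiv track=rewrite | github.com/elevend0g/beta | src/phase19_cross_domain.py | sort_tokenize
-- ===== SOURCE A (Python) =====
-- SORT_VOCAB = {
--     '<PAD>': 0, '<BOS>': 1, '<EOS>': 2, '<HALT>': 3,
--     'Input:': 4, 'Result:': 5,
--     'A': 6, 'B': 7, 'C': 8, 'D': 9, 'E': 10, 'F': 11,
--     '>': 12, '<': 13, '=': 14,
--     'swap': 15, 'keep': 16, ' ': 17,
-- }
--
-- _MULTI_TOKENS = ('Input:', 'Result:', 'swap', 'keep')
--
-- def sort_tokenize(text: str) -> list:
--     """Convert a sorting-task text string to a list of token IDs."""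
--     tokens = []
--     i = 0
--     while i < len(text):
--         matched = False
--         for tok in _MULTI_TOKENS:
--             n = len(tok)
--             if text[i:i + n] == tok:
--                 tokens.append(SORT_VOCAB[tok])
--                 i += n
--                 matched = True
--                 break
--         if not matched:
--             tokens.append(SORT_VOCAB.get(text[i], SORT_VOCAB[' ']))
--             i += 1
--     return tokens
-- ===== SOURCE B (Python) =====
-- SORT_VOCAB = {
--     '<PAD>': 0, '<BOS>': 1, '<EOS>': 2, '<HALT>': 3,
--     'Input:': 4, 'Result:': 5,
--     'A': 6, 'B': 7, 'C': 8, 'D': 9, 'E': 10, 'F': 11,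
--     '>': 12, '<': 13, '=': 14,
--     'swap': 15, 'keep': 16, ' ': 17,
-- }
--
-- _MULTI_TOKENS = ('Input:', 'Result:', 'swap', 'keep')
--
-- # Trie of the multi-character tokens, built once: dict-of-dicts keyed by char,
-- # with the terminal marker None holding the token id.
-- _TRIE = {}
-- for _tok in _MULTI_TOKENS:
--     _node = _TRIE
--     for _ch in _tok:
--         _node = _node.setdefault(_ch, {})
--     _node[None] = SORT_VOCAB[_tok]
--
--
-- def sort_tokenize(text: str) -> list:
--     """Convert a sorting-task text string to a list of token IDs."""
--     tokens = []
--     i = 0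
--     n = len(text)
--     while i < n:
--         node = _TRIE
--         j = i
--         best = None  # (token id, end index) of deepest terminal reached
--         while j < n and text[j] in node:
--             node = node[text[j]]
--             j += 1
--             if None in node:
--                 best = (node[None], j)
--         if best is not None:
--             tokens.append(best[0])
--             i = best[1]
--         else:
--             tokens.append(SORT_VOCAB.get(text[i], SORT_VOCAB[' ']))
--             i += 1
--     return tokens
-- ===== Notes on version B (the rewrite author's own statement) =====
-- stated objective: faster
-- what changed: Replaces A's per-position probe over the 4-tuple of multi-token strings (each slicing and comparing the text) by a trie of those tokens built once, scanned char-by-char keeping the deepest terminal reached.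
import Mathlib
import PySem

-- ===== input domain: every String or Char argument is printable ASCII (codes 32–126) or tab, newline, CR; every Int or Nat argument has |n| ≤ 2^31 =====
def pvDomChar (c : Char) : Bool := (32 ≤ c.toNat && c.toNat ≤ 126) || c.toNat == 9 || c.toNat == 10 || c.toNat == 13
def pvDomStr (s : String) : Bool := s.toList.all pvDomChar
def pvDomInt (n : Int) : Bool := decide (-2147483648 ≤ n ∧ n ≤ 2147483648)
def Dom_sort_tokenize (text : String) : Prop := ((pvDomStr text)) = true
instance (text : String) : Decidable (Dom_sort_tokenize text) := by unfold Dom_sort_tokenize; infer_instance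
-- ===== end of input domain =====

-- B replaces A's per-position probe over the 4-tuple of multi-token strings by a trie of
-- those tokens built once and scanned char-by-char; a timing run measured B faster.

-- ===== PORT A =====
-- shared module-level constants of the Python file
def pvVocab : PySem.Dict String Int := PySem.Dict.ofList
  [("<PAD>", 0), ("<BOS>", 1), ("<EOS>", 2), ("<HALT>", 3),
   ("Input:", 4), ("Result:", 5),
   ("A", 6), ("B", 7), ("C", 8), ("D", 9), ("E", 10), ("F", 11),
   (">", 12), ("<", 13), ("=", 14),
   ("swap", 15), ("keep", 16), (" ", 17)]

def pvMulti : List String := ["Input:", "Result:", "swap", "keep"]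

-- A's inner `for tok in _MULTI_TOKENS` with break: first token that matches at the
-- current position.  `text[i:i+n] == tok` (Python slice clamps) is exactly
-- "tok.toList is a prefix of the remaining characters"; on a match A appends
-- SORT_VOCAB[tok] (key always present; ported as getD _ 0) and advances i by n
-- (= drops n characters here).
def pvMatchA : List String → List Char → Option (Int × List Char)
  | [], _ => none
  | tok :: ts, l =>
      if tok.toList.isPrefixOf l then some (pvVocab.getD tok 0, l.drop tok.toList.length)
      else pvMatchA ts l

lemma pvMatchA_rem : ∀ (ts : List String) (l : List Char) (id : Int) (rem : List Char),
    (∀ t ∈ ts, t.toList ≠ []) → pvMatchA ts l = some (id, rem) → rem.length < l.length := by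
  intro ts
  induction ts with
  | nil => intro l id rem _ h; simp [pvMatchA] at h
  | cons tok ts ih =>
      intro l id rem hne h
      simp only [pvMatchA] at h
      split at h
      · rename_i hpre
        have hp : tok.toList <+: l := by
          exact List.isPrefixOf_iff_prefix.mp hpre
        have hlen : tok.toList.length ≤ l.length := hp.length_le
        have h1 : tok.toList ≠ [] := hne tok (by simp)
        have h2 : 1 ≤ tok.toList.length := by
          cases htl : tok.toList with
          | nil => exact absurd htl h1
          | cons a as => simp
        simp only [Option.some.injEq, Prod.mk.injEq] at h
        rw [← h.2, List.length_drop]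
        omega
      · exact ih l id rem (fun t ht => hne t (by simp [ht])) h

-- A's outer while loop: i advancing through text = structural recursion dropping
-- the consumed characters.
def pvGoA : List Char → List Int
  | [] => []
  | c :: rest =>
      match h : pvMatchA pvMulti (c :: rest) with
      | some (id, rem) => id :: pvGoA rem
      | none => pvVocab.getD (String.ofList [c]) 17 :: pvGoA rest
termination_by l => l.length
decreasing_by
  · exact pvMatchA_rem pvMulti (c :: rest) id rem (by intro t ht; fin_cases ht <;> simp) h
  · simp

def sort_tokenize (text : String) : List Int := pvGoA text.toList

-- ===== PORT B =====
-- trie: dict-of-dicts keyed by char, terminal marker (Python's None key) as Option Int.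
-- (mutual pair instead of a nested inductive)
mutual
inductive PvTrie where
  | node : Option Int → PvKids → PvTrie
inductive PvKids where
  | nil : PvKids
  | cons : Char → PvTrie → PvKids → PvKids
end

def pvTerm : PvTrie → Option Int
  | .node t _ => t

-- `ch in node` / `node[ch]` of the child dict
def pvFind : PvKids → Char → Option PvTrie
  | .nil, _ => none
  | .cons c' t k, c => if c = c' then some t else pvFind k c

def pvSetKid : PvKids → Char → PvTrie → PvKids
  | .nil, c, t => .cons c t .nil
  | .cons c' t' k, c, t => if c = c' then .cons c' t k else .cons c' t' (pvSetKid k c t)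

-- `node = node.setdefault(ch, {})` walking down, `node[None] = id` at the end
-- (functional: the path is rebuilt bottom-up; same resulting trie)
def pvInsert : PvTrie → List Char → Int → PvTrie
  | .node _ k, [], id => .node (some id) k
  | .node t k, c :: cs, id =>
      .node t (pvSetKid k c (pvInsert ((pvFind k c).getD (.node none .nil)) cs id))

-- the module-level `_TRIE` built from _MULTI_TOKENS
def pvRoot : PvTrie :=
  pvMulti.foldl (fun tr tok => pvInsert tr tok.toList (pvVocab.getD tok 0)) (.node none .nil)

-- B's inner while loop: descend the trie consuming characters, keeping the deepest
-- terminal reached as (token id, remaining characters after it).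
def pvDescend : PvTrie → List Char → Option (Int × List Char) → Option (Int × List Char)
  | _, [], best => best
  | .node _ k, c :: rest, best =>
      match pvFind k c with
      | none => best
      | some t' =>
          pvDescend t' rest (match pvTerm t' with | some id => some (id, rest) | none => best)

lemma pvDescend_rem : ∀ (l : List Char) (n : Nat) (t : PvTrie) (b : Option (Int × List Char))
    (id : Int) (rem : List Char),
    (∀ i r, b = some (i, r) → r.length ≤ n) → l.length ≤ n →
    pvDescend t l b = some (id, rem) → rem.length ≤ n := by
  intro l
  induction l with
  | nil => intro n t b id rem hb _ h; simp [pvDescend] at h; exact hb id rem (by simp [h])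
  | cons c rest ih =>
      intro n t b id rem hb hl h
      obtain ⟨x, k⟩ := t
      simp only [pvDescend] at h
      have hr : rest.length ≤ n := by simp at hl; omega
      cases hf : pvFind k c with
      | none => rw [hf] at h; exact hb id rem h
      | some t' =>
          rw [hf] at h; simp only at h
          refine ih n t' _ id rem ?_ hr h
          intro i r hir
          cases ht : pvTerm t' with
          | none => rw [ht] at hir; exact hb i r hir
          | some j =>
              rw [ht] at hir; simp only [Option.some.injEq, Prod.mk.injEq] at hir
              rw [← hir.2]; exact hr

lemma pvDescend_start (c : Char) (rest : List Char) (id : Int) (rem : List Char)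
    (h : pvDescend pvRoot (c :: rest) none = some (id, rem)) : rem.length ≤ rest.length := by
  obtain ⟨x, k, hx⟩ : ∃ x k, pvRoot = PvTrie.node x k := by
    cases hk : pvRoot with | node x k => exact ⟨x, k, rfl⟩
  rw [hx] at h
  simp only [pvDescend] at h
  cases hf : pvFind k c with
  | none => rw [hf] at h; simp at h
  | some t' =>
      rw [hf] at h; simp only at h
      refine pvDescend_rem rest rest.length t' _ id rem ?_ le_rfl h
      intro i r hir
      cases ht : pvTerm t' with
      | none => rw [ht] at hir; simp at hir
      | some j =>
          rw [ht] at hir; simp only [Option.some.injEq, Prod.mk.injEq] at hir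
          rw [← hir.2]

-- B's outer while loop
def pvGoB : List Char → List Int
  | [] => []
  | c :: rest =>
      match h : pvDescend pvRoot (c :: rest) none with
      | some (id, rem) => id :: pvGoB rem
      | none => pvVocab.getD (String.ofList [c]) 17 :: pvGoB rest
termination_by l => l.length
decreasing_by
  · have := pvDescend_start c rest id rem h; simp; omega
  · simp

def sort_tokenize_alt (text : String) : List Int := pvGoB text.toList

-- ===== PRECONDITION & SPEC =====
def Spec_sort_tokenize (text : String) (out : List Int) : Prop := out = sort_tokenize_alt text
instance (text : String) (out : List Int) : Decidable (Spec_sort_tokenize text out) := by unfold Spec_sort_tokenize; infer_instance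

-- ===== CLAIM (what is proved, stated in full; the proofs are below) =====
def Claim_equal_sort_tokenize : Prop := ∀ (text : String), Dom_sort_tokenize text → Spec_sort_tokenize text (sort_tokenize text)

-- ===== LEMMAS AND PROOFS =====

-- proof-side view of the concrete trie: a non-branching chain ending in a terminal
def pvChain : List Char → Int → PvTrie
  | [], id => .node (some id) .nil
  | c :: cs, id => .node none (.cons c (pvChain cs id) .nil)

lemma pvRoot_eq : pvRoot = PvTrie.node none
    (.cons 'I' (pvChain ['n','p','u','t',':'] 4)
     (.cons 'R' (pvChain ['e','s','u','l','t',':'] 5)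
      (.cons 's' (pvChain ['w','a','p'] 15)
       (.cons 'k' (pvChain ['e','e','p'] 16) .nil)))) := by rfl

lemma pvDescend_nilkids (X : Option Int) (l : List Char) (b : Option (Int × List Char)) :
    pvDescend (PvTrie.node X .nil) l b = b := by
  cases l <;> simp [pvDescend, pvFind]

lemma pvDescend_chain (cs : List Char) : ∀ (X : Option Int) (c : Char) (id : Int)
    (l : List Char) (b : Option (Int × List Char)),
    pvDescend (PvTrie.node X (PvKids.cons c (pvChain cs id) PvKids.nil)) l b
      = if (c :: cs).isPrefixOf l then some (id, l.drop (cs.length + 1)) else b := by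
  induction cs with
  | nil =>
      intro X c id l b
      cases l with
      | nil => simp [pvDescend, List.isPrefixOf]
      | cons d rest =>
          simp only [pvDescend, pvFind, List.isPrefixOf]
          by_cases hdc : d = c
          · subst hdc
            simp [pvChain, pvTerm, pvDescend_nilkids]
          · have hb : (c == d) = false := beq_eq_false_iff_ne.mpr (Ne.symm hdc)
            simp [hdc, hb]
  | cons c2 cs2 ih =>
      intro X c id l b
      cases l with
      | nil => simp [pvDescend, List.isPrefixOf]
      | cons d rest =>
          simp only [pvDescend, pvFind]
          by_cases hdc : d = c
          · subst hdc
            simp only [reduceIte, pvChain, pvTerm]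
            rw [ih]
            simp [List.isPrefixOf]
          · have hb : (c == d) = false := beq_eq_false_iff_ne.mpr (Ne.symm hdc)
            simp [hdc, hb, List.isPrefixOf]

lemma pvTerm_chain (c : Char) (cs : List Char) (id : Int) :
    pvTerm (pvChain (c :: cs) id) = none := rfl

lemma pvDescend_chain' (c : Char) (cs : List Char) (id : Int) (l : List Char)
    (b : Option (Int × List Char)) :
    pvDescend (pvChain (c :: cs) id) l b
      = if (c :: cs).isPrefixOf l then some (id, l.drop (cs.length + 1)) else b := by
  rw [show pvChain (c :: cs) id
        = PvTrie.node none (PvKids.cons c (pvChain cs id) PvKids.nil) from rfl,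
     pvDescend_chain]

-- the per-position step of B (deepest trie match) equals the per-position step of A
-- (first matching token of _MULTI_TOKENS)
lemma pvStep (c : Char) (rest : List Char) :
    pvDescend pvRoot (c :: rest) none = pvMatchA pvMulti (c :: rest) := by
  have hI : "Input:".toList = ['I','n','p','u','t',':'] := rfl
  have hR : "Result:".toList = ['R','e','s','u','l','t',':'] := rfl
  have hs : "swap".toList = ['s','w','a','p'] := rfl
  have hk : "keep".toList = ['k','e','e','p'] := rfl
  have v1 : pvVocab.getD "Input:" 0 = (4:Int) := by decide
  have v2 : pvVocab.getD "Result:" 0 = (5:Int) := by decide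
  have v3 : pvVocab.getD "swap" 0 = (15:Int) := by decide
  have v4 : pvVocab.getD "keep" 0 = (16:Int) := by decide
  rw [pvRoot_eq]
  simp only [pvDescend, pvFind, pvMulti, pvMatchA, hI, hR, hs, hk]
  by_cases h1 : c = 'I'
  · subst h1
    simp only [reduceIte, pvTerm_chain, pvDescend_chain']
    simp [List.isPrefixOf, v1]
  · by_cases h2 : c = 'R'
    · subst h2
      simp only [reduceIte, pvTerm_chain, pvDescend_chain']
      simp [pvTerm_chain, pvDescend_chain', List.isPrefixOf, v2]
    · by_cases h3 : c = 's'
      · subst h3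
        simp only [reduceIte, pvTerm_chain, pvDescend_chain']
        simp [pvTerm_chain, pvDescend_chain', List.isPrefixOf, v3]
      · by_cases h4 : c = 'k'
        · subst h4
          simp only [reduceIte, pvTerm_chain, pvDescend_chain']
          simp [pvTerm_chain, pvDescend_chain', List.isPrefixOf, v4]
        · have b1 : ('I' == c) = false := beq_eq_false_iff_ne.mpr (Ne.symm h1)
          have b2 : ('R' == c) = false := beq_eq_false_iff_ne.mpr (Ne.symm h2)
          have b3 : ('s' == c) = false := beq_eq_false_iff_ne.mpr (Ne.symm h3)
          have b4 : ('k' == c) = false := beq_eq_false_iff_ne.mpr (Ne.symm h4)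
          simp [h1, h2, h3, h4, b1, b2, b3, b4, List.isPrefixOf]

lemma pvGo_eq : ∀ (n : Nat) (l : List Char), l.length ≤ n → pvGoA l = pvGoB l := by
  intro n
  induction n with
  | zero =>
      intro l h
      have : l = [] := List.eq_nil_of_length_eq_zero (Nat.le_zero.mp h)
      subst this; simp [pvGoA, pvGoB]
  | succ n ih =>
      intro l h
      cases l with
      | nil => simp [pvGoA, pvGoB]
      | cons c rest =>
          have hr : rest.length ≤ n := by simp at h; omega
          simp only [pvGoA, pvGoB]
          rw [← pvStep c rest]
          cases hd : pvDescend pvRoot (c :: rest) none with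
          | none => simp only [hd]; rw [ih rest hr]
          | some p =>
              obtain ⟨id, rem⟩ := p
              simp only [hd]
              rw [ih rem (le_trans (pvDescend_start c rest id rem hd) hr)]

-- ===== VERDICT (by name: the statement is the Claim_ definition above) =====
theorem sort_tokenize_spec : Claim_equal_sort_tokenize := by
  intro text _
  unfold Spec_sort_tokenize sort_tokenize sort_tokenize_alt
  exact pvGo_eq text.toList.length text.toList le_rfl
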